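-- pv_equiv track=rewrite | github.com/Siddharth11235/Advent_of_Code_2023 | day13/main.py | check_for_horizontal_mirroring
-- ===== SOURCE A (Python) =====
-- def common_soln(split_map):
--     potential_origins = []
--     if len(set(split_map)) < len(split_map):
--         for i in range(1, len(split_map)):
--             if split_map[i] == split_map[i - 1]:
--                 potential_origins.append(i)
--     else:
--         return []
--     potential_outputs = []
--     for origin in potential_origins:
--         ind_above = origin - 1
--         ind_below = origin
--         completed_loop = True
--         while ind_above >= 0 and ind_below < len(split_map):
--             if split_map[ind_above] == split_map[ind_below]:
--                 ind_above -= 1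
--                 ind_below += 1
--             else:
--                 completed_loop = False
--                 break
--         if completed_loop:
--             potential_outputs.append(origin)
--
--     return potential_outputs
--
-- def check_for_horizontal_mirroring(split_map):
--     column_map = [""] * len(split_map[0])
--
--     # Iterate over each row and column to build the column strings
--     potential_origins = []
--     for row in split_map:
--         for i, char in enumerate(row):
--             column_map[i] += char
--
--     output = common_soln(column_map)
--     return output
-- ===== SOURCE B (Python) =====
-- def check_for_horizontal_mirroring(split_map):
--     column_map = [""] * len(split_map[0])
--     # build columns exactly as A does (same IndexError behaviour on ragged input)
--     for row in split_map:
--         for i, char in enumerate(row):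
--             column_map[i] += char
--     # single pass: i is a mirror line iff the prefix reversed matches the suffix
--     return [i for i in range(1, len(column_map))
--             if all(a == b for a, b in zip(reversed(column_map[:i]), column_map[i:]))]
-- ===== Notes on version B (the rewrite author's own statement) =====
-- stated objective: simpler
-- what changed: Replaces common_soln's two-phase logic (set-duplicate pre-check, adjacent-equal candidate scan, then a while-loop expansion per candidate) with one direct pass that tests each split index by comparing the reversed prefix against the suffix; the pre-check and candidate filter are proved redundant.
import Mathlib
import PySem

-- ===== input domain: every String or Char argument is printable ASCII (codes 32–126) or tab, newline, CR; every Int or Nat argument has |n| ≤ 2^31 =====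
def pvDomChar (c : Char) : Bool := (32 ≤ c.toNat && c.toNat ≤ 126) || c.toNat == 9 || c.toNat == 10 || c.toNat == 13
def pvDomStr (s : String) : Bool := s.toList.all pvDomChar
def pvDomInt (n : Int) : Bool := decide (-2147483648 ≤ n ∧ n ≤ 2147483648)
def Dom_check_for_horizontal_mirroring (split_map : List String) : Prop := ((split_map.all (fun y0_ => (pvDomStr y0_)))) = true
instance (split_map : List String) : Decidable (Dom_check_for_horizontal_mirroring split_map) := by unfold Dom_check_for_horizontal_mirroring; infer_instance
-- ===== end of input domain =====

-- B replaces common_soln's two-phase candidate scan + while-loop expansion with one direct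
-- reversed-prefix/suffix comparison per split index (simpler; proved equivalent).

-- ===== PORT A =====
-- The column-building loop is textually identical in Source A and Source B, so both ports share it.
-- Columns are kept as List Char (Python builds them as strings; equality agrees).
def pvBuildCols (split_map : List String) : List (List Char) :=
  split_map.foldl
    (fun cm row =>
      (PySem.List.enumerate row.toList 0).foldl
        (fun cm2 p => cm2.modify p.1.toNat (fun col => col ++ [p.2])) cm)
    (List.replicate (split_map.headD "").toList.length ([] : List Char))
    -- headD "": Python's split_map[0] raises IndexError on []; Pre_ excludes that input

-- the 'while ind_above >= 0 and ind_below < len' expansion loop of common_soln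
def pvMirrorWhile (sm : List (List Char)) (a b : Int) : Bool :=
  if 0 ≤ a ∧ b < (sm.length : Int) then
    if PySem.List.pyGetD sm a [] == PySem.List.pyGetD sm b [] then
      pvMirrorWhile sm (a - 1) (b + 1)
    else false
  else true
termination_by (a + 1).toNat
decreasing_by omega

def pvCommonSoln (sm : List (List Char)) : List Int :=
  if PySem.Set.len (PySem.Set.ofList sm) < PySem.List.len sm then
    let potential_origins :=
      (PySem.List.pyRange 1 (PySem.List.len sm) 1).foldl
        (fun acc i =>
          if PySem.List.pyGetD sm i [] == PySem.List.pyGetD sm (i - 1) [] then acc ++ [i]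
          else acc) []
    potential_origins.foldl
      (fun out origin => if pvMirrorWhile sm (origin - 1) origin then out ++ [origin] else out) []
  else []

def check_for_horizontal_mirroring (split_map : List String) : List Int :=
  pvCommonSoln (pvBuildCols split_map)

-- ===== PORT B =====
-- 'all(a == b for a, b in zip(reversed(column_map[:i]), column_map[i:]))'
def pvMirrorAt (cols : List (List Char)) (i : Int) : Bool :=
  (((PySem.List.slice cols none (some i)).reverse).zip
      (PySem.List.slice cols (some i) none)).all (fun p => p.1 == p.2)

def check_for_horizontal_mirroring_alt (split_map : List String) : List Int :=
  let column_map := pvBuildCols split_map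
  (PySem.List.pyRange 1 (PySem.List.len column_map) 1).filter (fun i => pvMirrorAt column_map i)

-- ===== PRECONDITION & SPEC =====
-- Pre_ excludes exactly the inputs where the Python raises IndexError (both A and B raise
-- there, in the identical column-building loop): the empty list, and lists with a row
-- longer than the first row.
def Pre_check_for_horizontal_mirroring (split_map : List String) : Prop :=
  split_map ≠ [] ∧ ∀ s ∈ split_map, s.toList.length ≤ (split_map.headD "").toList.length
instance (split_map : List String) : Decidable (Pre_check_for_horizontal_mirroring split_map) := by
  unfold Pre_check_for_horizontal_mirroring; infer_instance

def pvWitness_check_for_horizontal_mirroring : List String := ["#.##.", "#.##."]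

def Spec_check_for_horizontal_mirroring (split_map : List String) (out : List Int) : Prop := out = check_for_horizontal_mirroring_alt split_map
instance (split_map : List String) (out : List Int) : Decidable (Spec_check_for_horizontal_mirroring split_map out) := by unfold Spec_check_for_horizontal_mirroring; infer_instance

-- ===== CLAIM (what is proved, stated in full; the proofs are below) =====
def Claim_equal_check_for_horizontal_mirroring : Prop := ∀ (split_map : List String), Dom_check_for_horizontal_mirroring split_map → Pre_check_for_horizontal_mirroring split_map → Spec_check_for_horizontal_mirroring split_map (check_for_horizontal_mirroring split_map)

-- ===== LEMMAS AND PROOFS =====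

-- B's per-index test, rewritten through take/drop.
theorem pvMirrorAt_eq_zip (cols : List (List Char)) (i : Int) (hi : 0 ≤ i) :
    pvMirrorAt cols i =
      ((cols.take i.toNat).reverse.zip (cols.drop i.toNat)).all (fun p => p.1 == p.2) := by
  unfold pvMirrorAt
  rw [PySem.List.slice_to cols hi, PySem.List.slice_from cols hi]

-- A's while loop computes exactly B's zip-all test.
theorem pvMirrorWhile_eq (sm : List (List Char)) (a b : Int)
    (ha : -1 ≤ a) (ha2 : a < (sm.length : Int)) (hb : 0 ≤ b) :
    pvMirrorWhile sm a b =
      ((sm.take (a + 1).toNat).reverse.zip (sm.drop b.toNat)).all (fun p => p.1 == p.2) := by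
  rw [pvMirrorWhile]
  by_cases h : 0 ≤ a ∧ b < (sm.length : Int)
  · obtain ⟨h0, h1⟩ := h
    have hna : a.toNat < sm.length := by omega
    have hnb : b.toNat < sm.length := by omega
    have htake : (a + 1).toNat = a.toNat + 1 := by omega
    rw [if_pos ⟨h0, h1⟩, htake, List.take_add_one, List.drop_eq_getElem_cons hnb]
    rw [PySem.List.pyGetD_eq_getElem sm [] h0 ha2, PySem.List.pyGetD_eq_getElem sm [] hb h1]
    have hgl : sm[a.toNat]?.toList = [sm[a.toNat]] := by
      simp [List.getElem?_eq_getElem hna]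
    rw [hgl, List.reverse_append]
    simp only [List.reverse_singleton, List.singleton_append, List.zip_cons_cons, List.all_cons]
    by_cases heq : sm[a.toNat] == sm[b.toNat]
    · rw [if_pos heq, heq,
        pvMirrorWhile_eq sm (a - 1) (b + 1) (by omega) (by omega) (by omega)]
      have : (a - 1 + 1).toNat = a.toNat := by omega
      have hb1 : (b + 1).toNat = b.toNat + 1 := by omega
      rw [this, hb1]
      simp
    · rw [if_neg heq]
      simp [Bool.eq_false_iff.mpr heq]
  · rw [if_neg h]
    rcases (not_and_or.mp h) with h' | h'
    · have : a = -1 := by omega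
      subst this
      simp
    · have : sm.length ≤ b.toNat := by omega
      rw [List.drop_eq_nil_of_le this]
      simp
termination_by (a + 1).toNat
decreasing_by omega

-- a mirror at i forces the two rows adjacent to the split to be equal
theorem pvMirrorAt_adj (sm : List (List Char)) (i : Int) (h1 : 1 ≤ i) (h2 : i < (sm.length : Int))
    (hm : pvMirrorAt sm i = true) : sm[i.toNat - 1]'(by omega) = sm[i.toNat]'(by omega) := by
  rw [pvMirrorAt_eq_zip sm i (by omega)] at hm
  have hti : i.toNat ≤ sm.length := by omega
  have hlt : i.toNat - 1 < i.toNat := by omega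
  have hk : i.toNat - 1 + 1 = i.toNat := by omega
  have hhead : (sm.take i.toNat).reverse =
      sm[i.toNat - 1]'(by omega) :: (sm.take (i.toNat - 1)).reverse := by
    conv_lhs => rw [← hk]
    rw [List.take_add_one, List.reverse_append]
    simp [List.getElem?_eq_getElem (show i.toNat - 1 < sm.length by omega)]
  have hdrop : sm.drop i.toNat = sm[i.toNat]'(by omega) :: sm.drop (i.toNat + 1) :=
    List.drop_eq_getElem_cons (by omega)
  rw [hhead, hdrop] at hm
  simp only [List.zip_cons_cons, List.all_cons, Bool.and_eq_true, beq_iff_eq] at hm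
  exact hm.1

-- if the columns are pairwise distinct, no split index mirrors
theorem nodup_of_no_dup_check (sm : List (List Char))
    (h : ¬ PySem.Set.len (PySem.Set.ofList sm) < PySem.List.len sm) : sm.Nodup := by
  have hle := PySem.Set.length_ofList_le sm
  have hlen : (PySem.Set.ofList sm).length = sm.length := by
    simp only [PySem.Set.len, PySem.List.len] at h
    omega
  have hfin : (PySem.Set.ofList sm).toFinset = sm.toFinset := by
    ext x
    simp [PySem.Set.mem_ofList]
  have hcard : sm.toFinset.card = sm.length := by
    rw [← hfin, List.toFinset_card_of_nodup (PySem.Set.nodup_ofList sm), hlen]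
  have := Multiset.toFinset_card_eq_card_iff_nodup (m := (sm : Multiset (List Char)))
  exact this.mp (by simpa using hcard)

-- main bridge: common_soln sm = B's filter, for every column list
theorem pvCommonSoln_eq_filter (sm : List (List Char)) :
    pvCommonSoln sm =
      (PySem.List.pyRange 1 (PySem.List.len sm) 1).filter (fun i => pvMirrorAt sm i) := by
  unfold pvCommonSoln
  by_cases hdup : PySem.Set.len (PySem.Set.ofList sm) < PySem.List.len sm
  · rw [if_pos hdup]
    rw [PySem.List.foldl_append_if_eq_filter
        (fun i => PySem.List.pyGetD sm i [] == PySem.List.pyGetD sm (i - 1) []),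
      List.nil_append,
      PySem.List.foldl_append_if_eq_filter (fun origin => pvMirrorWhile sm (origin - 1) origin),
      List.nil_append, List.filter_filter]
    apply List.filter_congr
    intro i hi
    rw [PySem.List.mem_pyRange_one] at hi
    simp only [PySem.List.len] at hi
    have h1 : (1:Int) ≤ i := hi.1
    have h2 : i < (sm.length : Int) := hi.2
    have hwz : pvMirrorWhile sm (i - 1) i = pvMirrorAt sm i := by
      rw [pvMirrorWhile_eq sm (i - 1) i (by omega) (by omega) (by omega),
        pvMirrorAt_eq_zip sm i (by omega)]
      have : (i - 1 + 1).toNat = i.toNat := by omega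
      rw [this]
    rw [hwz]
    by_cases hm : pvMirrorAt sm i = true
    · have hadj := pvMirrorAt_adj sm i h1 h2 hm
      have hidx : (i - 1).toNat = i.toNat - 1 := by omega
      have hget : (PySem.List.pyGetD sm i [] == PySem.List.pyGetD sm (i - 1) []) = true := by
        rw [PySem.List.pyGetD_eq_getElem sm [] (by omega) h2,
          PySem.List.pyGetD_eq_getElem sm [] (by omega) (by omega : i - 1 < (sm.length : Int))]
        simp only [beq_iff_eq, hidx]
        exact hadj.symm
      rw [hm, hget]
      rfl
    · simp [Bool.eq_false_iff.mpr hm]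
  · rw [if_neg hdup]
    have hnd := nodup_of_no_dup_check sm hdup
    symm
    rw [List.filter_eq_nil_iff]
    intro i hi
    rw [PySem.List.mem_pyRange_one] at hi
    simp only [PySem.List.len] at hi
    intro hm
    have hadj := pvMirrorAt_adj sm i hi.1 hi.2 hm
    have : i.toNat - 1 = i.toNat := by
      have := (List.Nodup.getElem_inj_iff hnd).mp hadj
      exact this
    omega

-- ===== VERDICT (by name: the statement is the Claim_ definition above) =====
theorem check_for_horizontal_mirroring_spec : Claim_equal_check_for_horizontal_mirroring := by
  intro split_map _ _
  unfold Spec_check_for_horizontal_mirroring check_for_horizontal_mirroring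
    check_for_horizontal_mirroring_alt
  exact pvCommonSoln_eq_filter (pvBuildCols split_map)
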